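-- pv_equiv track=rewrite | github.com/jakehemmerle/evolutionary-mnist | evolution/mini_grid.py | enforce_cap_by_shrinking
-- ===== SOURCE A (Python) =====
-- def _product_size(option_lists: dict[str, list]) -> int:
--     n = 1
--     for v in option_lists.values():
--         n *= max(1, len(v))
--     return n
--
-- def enforce_cap_by_shrinking(option_lists: dict[str, list], cap: int) -> dict[str, list]:
--     """
--     Deterministically shrink option lists (drop from the end of the longest lists)
--     until the Cartesian product size is <= cap.
--     """
--     if cap < 1:
--         raise ValueError("cap must be >= 1")
--
--     shrunk = {k: list(v) for k, v in option_lists.items()}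
--     while _product_size(shrunk) > cap:
--         # Find the longest list with >1 option; break ties by key for determinism.
--         candidates = [(len(v), k) for k, v in shrunk.items() if len(v) > 1]
--         if not candidates:
--             break
--         _, key = max(candidates)
--         shrunk[key] = shrunk[key][:-1]
--     return shrunk
-- ===== SOURCE B (Python) =====
-- def enforce_cap_by_shrinking(option_lists: dict[str, list], cap: int) -> dict[str, list]:
--     """Level-descent algorithm: instead of one decrement per iteration, drop a
--     WHOLE length-level at a time with a single exponent jump of the product,
--     then resolve the one partial level by rank (the r largest keys at that
--     level drop one more step).  No per-decrement max scan, no list copying."""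
--     if cap < 1:
--         raise ValueError("cap must be >= 1")
--
--     lengths = {k: len(v) for k, v in option_lists.items()}
--     product = 1
--     for l in lengths.values():
--         product *= max(1, l)
--     L = max(lengths.values(), default=0)
--     # descend levels, applying each full level in one product update
--     while L >= 2 and product > cap:
--         c = sum(1 for l in lengths.values() if l >= L)
--         full = product // L ** c * (L - 1) ** c
--         if full > cap:
--             product = full
--             L -= 1
--         else:
--             break
--     demoted = []
--     if L >= 2 and product > cap:
--         # partial level: the r largest keys of this level drop one more step
--         r = 0
--         while product > cap:
--             product = product // L * (L - 1)
--             r += 1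
--         demoted = sorted((k for k, l in lengths.items() if l >= L), reverse=True)[:r]
--     return {k: v[:(L - 1 if k in demoted else min(len(v), L))]
--             for k, v in option_lists.items()}
-- ===== Notes on version B (the rewrite author's own statement) =====
-- stated objective: faster
-- what changed: B replaces A's one-decrement-per-iteration greedy loop (full product recompute and max scan per removed element) by a level-descent algorithm: it drops a whole length-level at a time with a single exponent-jump update of the product, then resolves the single partial level by rank (the r lexicographically largest keys of that level drop one more step), and slices each list once at the end.
import Mathlib
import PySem

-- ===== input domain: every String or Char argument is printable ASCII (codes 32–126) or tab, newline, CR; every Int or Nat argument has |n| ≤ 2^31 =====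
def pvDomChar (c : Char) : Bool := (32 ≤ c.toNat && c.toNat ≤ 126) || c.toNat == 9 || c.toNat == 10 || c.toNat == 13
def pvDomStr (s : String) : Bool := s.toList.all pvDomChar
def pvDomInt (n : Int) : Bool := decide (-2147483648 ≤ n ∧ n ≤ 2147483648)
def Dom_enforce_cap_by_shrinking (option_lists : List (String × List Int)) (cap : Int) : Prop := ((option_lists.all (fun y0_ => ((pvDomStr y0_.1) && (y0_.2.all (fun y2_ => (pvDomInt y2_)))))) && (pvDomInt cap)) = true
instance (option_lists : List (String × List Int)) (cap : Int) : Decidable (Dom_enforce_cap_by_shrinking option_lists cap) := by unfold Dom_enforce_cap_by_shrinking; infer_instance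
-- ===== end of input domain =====

-- B replaces A's one-decrement-per-iteration greedy loop by a level-descent algorithm
-- (whole length-levels dropped with one exponent jump of the product, one rank-resolved
-- partial level); proved to return A's exact value on every cap >= 1.


-- ===== PORT A =====
-- _product_size: n = 1; for v in d.values(): n *= max(1, len(v))
def pvProductSize (d : PySem.Dict String (List Int)) : Int :=
  d.values.foldl (fun n v => n * max 1 (v.length : Int)) 1

-- the while loop of A; fuel only makes the recursion total (the entry point passes
-- more fuel than the loop can ever use, since each iteration removes one element)
def pvShrinkA (cap : Int) : Nat → PySem.Dict String (List Int) → PySem.Dict String (List Int)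
  | 0, d => d
  | fuel + 1, d =>
    if pvProductSize d > cap then
      -- candidates = [(len(v), k) ...]; max2? of it is none exactly when it is empty ("break")
      match PySem.List.max2? ((d.items.filter (fun p => decide (1 < (p.2.length : Int)))).map
          (fun p => ((p.2.length : Int), p.1))) (fun c => c.1) (fun c => c.2) with
      | none => d
      | some c =>
          pvShrinkA cap fuel (d.insert c.2 (PySem.List.slice (d.getD c.2 []) none (some (-1))))
    else d

def enforce_cap_by_shrinking (option_lists : List (String × List Int)) (cap : Int) : List (String × List Int) :=
  -- shrunk = {k: list(v) for k, v in option_lists.items()}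
  let shrunk := option_lists.foldl (fun d p => d.insert p.1 p.2) PySem.Dict.empty
  (pvShrinkA cap ((shrunk.values.map List.length).sum + 1) shrunk).items

-- ===== PORT B =====
-- while L >= 2 and product > cap: batch a whole level; fuel (= L+1 at the call) only
-- makes the recursion total, the loop decreases L or breaks each iteration
def pvDescend (cap : Int) (lens : List Int) : Nat → Int → Int → Int × Int
  | 0, L, product => (L, product)
  | fuel + 1, L, product =>
    if 2 ≤ L ∧ cap < product then
      -- c = sum(1 for l in lengths.values() if l >= L)
      let c := lens.countP (fun l => decide (L ≤ l))
      -- full = product // L ** c * (L - 1) ** c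
      let full := PySem.Int.floordiv product (L ^ c) * (L - 1) ^ c
      if cap < full then pvDescend cap lens fuel (L - 1) full else (L, product)
    else (L, product)

-- r-loop of the partial level; fuel (= product+1 at the call) only makes it total,
-- product strictly decreases while it exceeds cap
def pvPartial (cap L : Int) : Nat → Int → Int → Int × Int
  | 0, product, r => (product, r)
  | fuel + 1, product, r =>
    if cap < product then
      pvPartial cap L fuel (PySem.Int.floordiv product L * (L - 1)) (r + 1)
    else (product, r)

def enforce_cap_by_shrinking_alt (option_lists : List (String × List Int)) (cap : Int) : List (String × List Int) :=
  let d := option_lists.foldl (fun d p => d.insert p.1 p.2) PySem.Dict.empty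
  -- lengths = {k: len(v) for k, v in option_lists.items()}
  let lengths := d.items.foldl (fun L p => L.insert p.1 ((p.2.length : Int))) PySem.Dict.empty
  -- product = 1; for l in lengths.values(): product *= max(1, l)
  let product := lengths.values.foldl (fun n l => n * max 1 l) 1
  -- L = max(lengths.values(), default=0)
  let L0 := match PySem.List.max? lengths.values (fun l => l) with | some m => m | none => 0
  let res := pvDescend cap lengths.values (L0.toNat + 1) L0 product
  -- demoted = sorted((k for k, l in lengths.items() if l >= L), reverse=True)[:r]
  let demoted : List String :=
    if 2 ≤ res.1 ∧ cap < res.2 then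
      (PySem.List.sorted ((lengths.items.filter (fun q => decide (res.1 ≤ q.2))).map Prod.fst)
        (fun k => k) true).take ((pvPartial cap res.1 (res.2.toNat + 1) res.2 0).2.toNat)
    else []
  d.items.map (fun p => (p.1, PySem.List.slice p.2 none
    (some (if demoted.contains p.1 then res.1 - 1 else min ((p.2.length : Int)) res.1))))

-- ===== PRECONDITION & SPEC =====
-- Pre_ excludes exactly the inputs on which A raises ValueError ("cap must be >= 1")
def Pre_enforce_cap_by_shrinking (option_lists : List (String × List Int)) (cap : Int) : Prop := 1 ≤ cap
instance (option_lists : List (String × List Int)) (cap : Int) : Decidable (Pre_enforce_cap_by_shrinking option_lists cap) := by unfold Pre_enforce_cap_by_shrinking; infer_instance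
def pvWitness_enforce_cap_by_shrinking : (List (String × List Int)) × Int := ([("a", [1, 2]), ("b", [0])], 2)

def Spec_enforce_cap_by_shrinking (option_lists : List (String × List Int)) (cap : Int) (out : List (String × List Int)) : Prop := out = enforce_cap_by_shrinking_alt option_lists cap
instance (option_lists : List (String × List Int)) (cap : Int) (out : List (String × List Int)) : Decidable (Spec_enforce_cap_by_shrinking option_lists cap out) := by unfold Spec_enforce_cap_by_shrinking; infer_instance

-- ===== CLAIM (what is proved, stated in full; the proofs are below) =====
def Claim_equal_enforce_cap_by_shrinking : Prop := ∀ (option_lists : List (String × List Int)) (cap : Int), Dom_enforce_cap_by_shrinking option_lists cap → Pre_enforce_cap_by_shrinking option_lists cap → Spec_enforce_cap_by_shrinking option_lists cap (enforce_cap_by_shrinking option_lists cap)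

-- ===== LEMMAS AND PROOFS =====

-- PHASE 1: A's loop on dicts of lists is simulated by the same greedy loop on lengths.

-- greedy selection of the lexicographically largest (length, key) with length > 1
def pvBest (L : PySem.Dict String Int) : Option (Int × String) :=
  L.items.foldl (fun best p =>
    if decide ((1 : Int) < p.2) && (match best with
                  | none => true
                  | some b => decide (b.1 < p.2) || (decide (p.2 = b.1) && decide (b.2 < p.1))) then some (p.2, p.1)
    else best) none

-- A's while loop, reproduced on the dict of lengths (proof-side reference program)
def pvGreedy (cap : Int) : Nat → PySem.Dict String Int → Int → PySem.Dict String Int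
  | 0, L, _ => L
  | fuel + 1, L, product =>
    if product > cap then
      match pvBest L with
      | none => L
      | some c =>
          pvGreedy cap fuel (L.insert c.2 (c.1 - 1)) (PySem.Int.floordiv product c.1 * (c.1 - 1))
    else L

-- abbreviation used throughout the proofs: the length image of a dict entry
def pvLenPair (p : String × List Int) : String × Int := (p.1, (p.2.length : Int))

-- the fold step of PySem.List.max2? at our instance
def pvMaxStep (acc : Option (Int × String)) (x : Int × String) : Option (Int × String) :=
  match acc with
  | none => some x
  | some m =>
      if (decide (m.1 < x.1) || !decide (x.1 < m.1) && decide (m.2 < x.2)) = true then some x else some m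

-- the fold step of pvBest
def pvBStep (best : Option (Int × String)) (p : String × Int) : Option (Int × String) :=
  if decide ((1 : Int) < p.2) && (match best with
                | none => true
                | some b => decide (b.1 < p.2) || (decide (p.2 = b.1) && decide (b.2 < p.1))) then some (p.2, p.1)
  else best

theorem pvBest_def (L : PySem.Dict String Int) : pvBest L = L.items.foldl pvBStep none := rfl

theorem pvMax2_def (xs : List (Int × String)) :
    PySem.List.max2? xs (fun c => c.1) (fun c => c.2) = xs.foldl pvMaxStep none := by
  unfold PySem.List.max2?
  congr 1
  funext acc x
  cases acc <;> rfl

theorem pvStep_eq (acc : Option (Int × String)) (q : String × Int) (h1 : (1 : Int) < q.2) :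
    pvBStep acc q = pvMaxStep acc (q.2, q.1) := by
  cases acc with
  | none => simp [pvBStep, pvMaxStep, h1]
  | some b =>
    simp only [pvBStep, pvMaxStep]
    rcases lt_trichotomy b.1 q.2 with h2 | h2 | h2
    · simp [h1, h2, not_lt_of_gt h2]
    · have h1' : (1 : Int) < b.1 := h2 ▸ h1
      by_cases h4 : b.2 < q.1 <;>
        simp [h1', h2.symm, h4]
    · have hne : ¬ q.2 = b.1 := by omega
      simp [h1, h2, not_lt_of_gt h2, hne]

theorem pvScan_foldl (l : List (String × Int)) : ∀ acc : Option (Int × String),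
    l.foldl pvBStep acc
      = ((l.filter (fun q => decide ((1 : Int) < q.2))).map (fun q => (q.2, q.1))).foldl pvMaxStep acc := by
  induction l with
  | nil => intro acc; rfl
  | cons q t ih =>
    intro acc
    by_cases h1 : (1 : Int) < q.2
    · simp only [List.foldl_cons, List.filter_cons, h1, decide_true,
        pvStep_eq acc q h1]
      exact ih _
    · have hstep : pvBStep acc q = acc := by simp [pvBStep, h1]
      simp only [List.foldl_cons, List.filter_cons, h1, decide_false, hstep]
      exact ih _

theorem pvBest_eq_max2? (L : PySem.Dict String Int) :
    pvBest L = PySem.List.max2?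
      ((L.items.filter (fun q => decide ((1 : Int) < q.2))).map (fun q => (q.2, q.1)))
      (fun c => c.1) (fun c => c.2) := by
  rw [pvBest_def, pvMax2_def, pvScan_foldl]

theorem pvMaxStep_mem : ∀ (xs : List (Int × String)) (acc : Option (Int × String)) (c : Int × String),
    xs.foldl pvMaxStep acc = some c → c ∈ xs ∨ acc = some c := by
  intro xs
  induction xs with
  | nil => intro acc c h; exact Or.inr h
  | cons x t ih =>
    intro acc c h
    rcases ih (pvMaxStep acc x) c h with hmem | hacc
    · exact Or.inl (List.mem_cons_of_mem _ hmem)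
    · cases acc with
      | none =>
        simp only [pvMaxStep] at hacc
        exact Or.inl (by simp [← Option.some_inj.mp hacc])
      | some m =>
        simp only [pvMaxStep] at hacc
        by_cases hcond : (decide (m.1 < x.1) || !decide (x.1 < m.1) && decide (m.2 < x.2)) = true
        · rw [if_pos hcond] at hacc
          exact Or.inl (by simp [← Option.some_inj.mp hacc])
        · rw [if_neg hcond] at hacc
          exact Or.inr hacc

theorem pvKeys_eq {ν : Type} (d : PySem.Dict String ν) : d.keys = d.items.map Prod.fst := rfl
theorem pvValues_eq {ν : Type} (d : PySem.Dict String ν) : d.values = d.items.map Prod.snd := rfl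

-- prefix relation between the item lists of two states of A's loop
def pvPref (xs ys : List (String × List Int)) : Prop :=
  ys.map Prod.fst = xs.map Prod.fst ∧
  ∀ i (h1 : i < xs.length) (h2 : i < ys.length), ys[i].2 <+: xs[i].2

theorem pvPref_refl (xs : List (String × List Int)) : pvPref xs xs :=
  ⟨rfl, fun _ _ _ => List.prefix_refl _⟩

theorem pvPref_trans {a b c : List (String × List Int)} (h1 : pvPref a b) (h2 : pvPref b c) : pvPref a c := by
  obtain ⟨hk1, hv1⟩ := h1
  obtain ⟨hk2, hv2⟩ := h2
  have hlen : b.length = a.length := by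
    have := congrArg List.length hk1; simpa using this
  refine ⟨hk2.trans hk1, fun i ha hc => ?_⟩
  exact (hv2 i (by omega) hc).trans (hv1 i ha (by omega))

-- product of the per-key factors, as a list product over the items
theorem pvProductSize_eq_prod (d : PySem.Dict String (List Int)) :
    pvProductSize d = (d.items.map (fun p => max 1 ((p.2.length : Int)))).prod := by
  unfold pvProductSize
  rw [pvValues_eq, List.prod_eq_foldl, List.foldl_map, List.foldl_map]

-- THE SIMULATION: A's dict of lists and the greedy dict of lengths run in lockstep
theorem pvLoop_sim (cap : Int) : ∀ (fuel : Nat) (d : PySem.Dict String (List Int)) (L : PySem.Dict String Int),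
    L.items = d.items.map pvLenPair → (d.items.map Prod.fst).Nodup →
    (pvGreedy cap fuel L (pvProductSize d)).items = (pvShrinkA cap fuel d).items.map pvLenPair
      ∧ pvPref d.items (pvShrinkA cap fuel d).items
      ∧ ((pvShrinkA cap fuel d).items.map Prod.fst).Nodup := by
  intro fuel
  induction fuel with
  | zero => intro d L hL hnd; exact ⟨hL, pvPref_refl _, hnd⟩
  | succ fuel ih =>
    intro d L hL hnd
    rw [pvShrinkA, pvGreedy]
    by_cases hcap : pvProductSize d > cap
    · rw [if_pos hcap, if_pos hcap]
      -- identify the greedy scan with A's max(candidates)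
      have hcand : pvBest L = PySem.List.max2?
          ((d.items.filter (fun p => decide (1 < (p.2.length : Int)))).map
            (fun p => ((p.2.length : Int), p.1))) (fun c => c.1) (fun c => c.2) := by
        rw [pvBest_eq_max2?, hL, List.filter_map, List.map_map]
        rfl
      rw [hcand]
      cases hmax : PySem.List.max2?
          ((d.items.filter (fun p => decide (1 < (p.2.length : Int)))).map
            (fun p => ((p.2.length : Int), p.1))) (fun c => c.1) (fun c => c.2) with
      | none => exact ⟨hL, pvPref_refl _, hnd⟩
      | some c =>
        dsimp only
        -- the selected entry really is an item of d with length > 1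
        rw [pvMax2_def] at hmax
        have hmem0 := pvMaxStep_mem _ none c hmax
        simp only [or_false, reduceCtorEq] at hmem0
        rcases List.mem_map.mp hmem0 with ⟨p, hpfil, hpc⟩
        rcases List.mem_filter.mp hpfil with ⟨hpmem, hplen⟩
        obtain ⟨k, v0⟩ := p
        subst hpc
        dsimp only
        have hlen1' : 1 < v0.length := by
          have := of_decide_eq_true hplen
          simpa using (by exact_mod_cast this : (1 : Int) < (v0.length : Int))
        -- dictionary facts
        have hndk : d.keys.Nodup := by rw [pvKeys_eq]; exact hnd
        have hkmem : k ∈ d.keys := by rw [pvKeys_eq]; exact List.mem_map_of_mem hpmem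
        have hcont : d.contains k = true := (PySem.Dict.contains_iff_mem_keys d k).mpr hkmem
        have hgetD : d.getD k [] = v0 := PySem.Dict.getD_of_mem_items d hpmem hndk []
        have hLk : L.contains k = true := by
          rw [PySem.Dict.contains_iff_mem_keys, pvKeys_eq, hL, List.map_map]
          exact List.mem_map_of_mem (f := Prod.fst ∘ pvLenPair) hpmem
        -- the updated states
        rw [hgetD, PySem.List.slice_to_neg_one]
        have hAit : (d.insert k v0.dropLast).items
            = d.items.map (fun p => if (p.1 == k) = true then (k, v0.dropLast) else p) :=
          PySem.Dict.items_insert_of_contains d _ hcont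
        have hBit : (L.insert k ((v0.length : Int) - 1)).items
            = L.items.map (fun q => if (q.1 == k) = true then (k, (v0.length : Int) - 1) else q) :=
          PySem.Dict.items_insert_of_contains L _ hLk
        -- invariant is preserved
        have hL' : (L.insert k ((v0.length : Int) - 1)).items
            = (d.insert k v0.dropLast).items.map pvLenPair := by
          rw [hBit, hAit, hL, List.map_map, List.map_map]
          refine List.map_congr_left (fun p hp => ?_)
          by_cases hk' : p.1 = k
          · simp [Function.comp_apply, pvLenPair, hk']
            omega
          · simp [Function.comp_apply, pvLenPair, hk']
        -- keys are unchanged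
        have hkeys' : (d.insert k v0.dropLast).items.map Prod.fst = d.items.map Prod.fst := by
          rw [hAit, List.map_map]
          refine List.map_congr_left (fun p hp => ?_)
          by_cases hk' : p.1 = k
          · simp [Function.comp_apply, hk']
          · simp [Function.comp_apply, hk']
        have hnd' : ((d.insert k v0.dropLast).items.map Prod.fst).Nodup := by
          rw [hkeys']; exact hnd
        -- the incremental product update is exact
        have hprod : PySem.Int.floordiv (pvProductSize d) (v0.length : Int) * ((v0.length : Int) - 1)
            = pvProductSize (d.insert k v0.dropLast) := by
          rcases List.append_of_mem hpmem with ⟨S, T, hST⟩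
          have hndST : ((S.map Prod.fst) ++ k :: (T.map Prod.fst)).Nodup := by
            have h := hnd
            rw [hST] at h
            simpa using h
          have hknS : ∀ p ∈ S, p.1 ≠ k := by
            intro p hpS hpk
            rw [List.nodup_append] at hndST
            exact hndST.2.2 _ (List.mem_map_of_mem hpS) _ (List.mem_cons_self) hpk
          have hknT : ∀ p ∈ T, p.1 ≠ k := by
            intro p hpT hpk
            rw [List.nodup_append] at hndST
            have := hndST.2.1
            rw [List.nodup_cons] at this
            exact this.1 (by rw [← hpk]; exact List.mem_map_of_mem hpT)
          have hSmap : S.map (fun p => if (p.1 == k) = true then (k, v0.dropLast) else p) = S := by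
            refine (List.map_congr_left (fun p hp => ?_)).trans (List.map_id _)
            have hb : (p.1 == k) = false := by simpa using hknS p hp
            simp [hb]
          have hTmap : T.map (fun p => if (p.1 == k) = true then (k, v0.dropLast) else p) = T := by
            refine (List.map_congr_left (fun p hp => ?_)).trans (List.map_id _)
            have hb : (p.1 == k) = false := by simpa using hknT p hp
            simp [hb]
          rw [pvProductSize_eq_prod, pvProductSize_eq_prod, hAit, hST]
          simp only [List.map_append, List.map_cons, List.prod_append, List.prod_cons,
            hSmap, hTmap, beq_self_eq_true, if_pos]
          have hmax1 : max 1 ((v0.length : Int)) = (v0.length : Int) := by omega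
          have hmax2 : max 1 ((v0.dropLast.length : Int)) = (v0.length : Int) - 1 := by
            rw [List.length_dropLast]; omega
          rw [hmax1, hmax2]
          have hpos : (0 : Int) < (v0.length : Int) := by omega
          rw [PySem.Int.floordiv_eq_ediv_of_pos hpos]
          set Sp := (S.map fun p => max 1 ((p.2.length : Int))).prod
          set Tp := (T.map fun p => max 1 ((p.2.length : Int))).prod
          have hres : Sp * ((v0.length : Int) * Tp) = (Sp * Tp) * (v0.length : Int) := by ring
          rw [hres, Int.mul_ediv_cancel _ (by omega)]
          ring
        -- single step of the prefix relation
        have hpref : pvPref d.items (d.insert k v0.dropLast).items := by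
          refine ⟨hkeys', fun i h1 h2 => ?_⟩
          simp only [hAit, List.getElem_map]
          by_cases hpk : (d.items[i].1 == k) = true
          · have heqi : d.items[i] = (k, v0) :=
              List.inj_on_of_nodup_map (f := Prod.fst) hnd
                (List.getElem_mem _) hpmem (eq_of_beq hpk)
            rw [heqi]
            simpa using List.dropLast_prefix v0
          · simp only [hpk, Bool.false_eq_true, if_neg, not_false_iff]
            exact List.prefix_refl _
        -- close by the induction hypothesis
        rw [hprod]
        obtain ⟨ha, hb, hc⟩ := ih (d.insert k v0.dropLast) (L.insert k ((v0.length : Int) - 1)) hL' hnd'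
        exact ⟨ha, pvPref_trans hpref hb, hc⟩
    · rw [if_neg hcap, if_neg hcap]
      exact ⟨hL, pvPref_refl _, hnd⟩

-- A's port, expressed through the greedy loop on lengths
theorem pvA_eq_greedy (option_lists : List (String × List Int)) (cap : Int) :
    enforce_cap_by_shrinking option_lists cap =
      (let d := option_lists.foldl (fun d p => d.insert p.1 p.2) PySem.Dict.empty
       let lengths := d.items.foldl (fun L p => L.insert p.1 ((p.2.length : Int))) PySem.Dict.empty
       let product := lengths.values.foldl (fun n l => n * max 1 l) 1
       let finalLens := pvGreedy cap ((d.values.map List.length).sum + 1) lengths product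
       d.items.map (fun p => (p.1, PySem.List.slice p.2 none (some (finalLens.getD p.1 0))))) := by
  unfold enforce_cap_by_shrinking
  dsimp only
  set d0 := option_lists.foldl (fun d p => d.insert p.1 p.2) PySem.Dict.empty with hd0
  have hnd0k : d0.keys.Nodup :=
    PySem.Dict.nodup_keys_foldl_insert_key option_lists Prod.fst (fun _ p => p.2)
      PySem.Dict.empty PySem.Dict.nodup_keys_empty
  have hnd0 : (d0.items.map Prod.fst).Nodup := by rw [← pvKeys_eq]; exact hnd0k
  set L0 := d0.items.foldl (fun L p => L.insert p.1 ((p.2.length : Int))) PySem.Dict.empty with hL0def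
  have hL0 : L0.items = d0.items.map pvLenPair := by
    rw [hL0def]
    have hfresh := PySem.Dict.items_foldl_insert_fresh d0.items (fun p => p.1)
      (fun p => ((p.2.length : Int))) (PySem.Dict.empty)
      (fun a _ => PySem.Dict.contains_empty (ν := Int) a.1) hnd0
    simpa using hfresh
  have hp0 : L0.values.foldl (fun n l => n * max 1 l) 1 = pvProductSize d0 := by
    rw [pvValues_eq, hL0, List.map_map]
    unfold pvProductSize
    rw [pvValues_eq, List.foldl_map, List.foldl_map]
    rfl
  rw [hp0]
  obtain ⟨hsim, ⟨hkeymap, hprefv⟩, hndf⟩ :=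
    pvLoop_sim cap ((d0.values.map List.length).sum + 1) d0 L0 hL0 hnd0
  set df := pvShrinkA cap ((d0.values.map List.length).sum + 1) d0 with hdf
  set Lf := pvGreedy cap ((d0.values.map List.length).sum + 1) L0 (pvProductSize d0) with hLf
  have hlen : df.items.length = d0.items.length := by
    have := congrArg List.length hkeymap; simpa using this
  have hLfnd : Lf.keys.Nodup := by
    rw [pvKeys_eq, hsim, List.map_map]
    exact (by exact hkeymap ▸ hnd0 : (df.items.map Prod.fst).Nodup)
  refine List.ext_getElem (by simpa using hlen) (fun i h1 h2 => ?_)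
  simp only [List.getElem_map]
  have h2' : i < d0.items.length := by simpa using h2
  have h1' : i < df.items.length := by simpa using h1
  have hki : df.items[i].1 = d0.items[i].1 := by
    have hq := congrArg (fun l => l[i]?) hkeymap
    simp only [List.getElem?_map] at hq
    rw [List.getElem?_eq_getElem (by omega : i < df.items.length),
      List.getElem?_eq_getElem h2'] at hq
    simpa using hq
  have hmemLf : (d0.items[i].1, (df.items[i].2.length : Int)) ∈ Lf.items := by
    rw [hsim]
    have hpl : pvLenPair df.items[i] = (d0.items[i].1, (df.items[i].2.length : Int)) := by
      rw [pvLenPair, hki]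
    rw [← hpl]
    exact List.mem_map_of_mem (List.getElem_mem _)
  have hgetD : Lf.getD d0.items[i].1 0 = (df.items[i].2.length : Int) :=
    PySem.Dict.getD_of_mem_items Lf hmemLf hLfnd 0
  rw [hgetD, PySem.List.slice_to_natCast]
  have hprei : df.items[i].2 <+: d0.items[i].2 := hprefv i h2' (by omega)
  have htake : List.take df.items[i].2.length d0.items[i].2 = df.items[i].2 :=
    (List.prefix_iff_eq_take.mp hprei).symm
  rw [htake, ← hki]

-- PHASE 2: the greedy loop on lengths computes the level-descent result of B.

-- abstract state of the greedy runs: base = original (key, length) items; D = keys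
-- already demoted one step below the current level t
def pvVal (t : Int) (D : List String) (p : String × Int) : Int :=
  if p.1 ∈ D then t - 1 else min p.2 t

def pvState (base : List (String × Int)) (t : Int) (D : List String) : List (String × Int) :=
  base.map (fun p => (p.1, pvVal t D p))

def pvPOf (xs : List (String × Int)) : Int := (xs.map (fun p => max 1 p.2)).prod

def pvKs (base : List (String × Int)) (t : Int) : List String :=
  PySem.List.sorted ((base.filter (fun q => decide (t ≤ q.2))).map Prod.fst) (fun k => k) true

def pvRest (base : List (String × Int)) (t : Int) : Int :=
  pvPOf (base.filter (fun p => decide (p.2 < t)))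

def pvMu (base : List (String × Int)) (t : Int) (D : List String) : Nat :=
  ((pvState base t D).map (fun p => p.2.toNat)).sum

-- demoted keys, as B computes them from the pvDescend output
def pvDemoted (cap : Int) (base : List (String × Int)) (res : Int × Int) : List String :=
  if 2 ≤ res.1 ∧ cap < res.2 then
    (pvKs base res.1).take ((pvPartial cap res.1 (res.2.toNat + 1) res.2 0).2.toNat)
  else []

-- lexicographic order used by max(candidates)
def pvLexLE (x m : Int × String) : Prop := x.1 < m.1 ∨ (x.1 = m.1 ∧ x.2 ≤ m.2)

theorem pvPOf_one_le (xs : List (String × Int)) : 1 ≤ pvPOf xs := by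
  induction xs with
  | nil => simp [pvPOf]
  | cons p t ih =>
    simp only [pvPOf, List.map_cons, List.prod_cons] at *
    nlinarith [le_max_left (1 : Int) p.2]

theorem pvKs_length (base : List (String × Int)) (t : Int) :
    (pvKs base t).length = (base.filter (fun q => decide (t ≤ q.2))).length := by
  unfold pvKs
  rw [PySem.List.length_sorted, List.length_map]

theorem pvCount_eq (base : List (String × Int)) (t : Int) :
    (base.map Prod.snd).countP (fun l => decide (t ≤ l)) = (pvKs base t).length := by
  rw [pvKs_length, List.countP_map, ← List.countP_eq_length_filter]
  rfl

theorem pvKs_nodup (base : List (String × Int)) (t : Int)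
    (hnd : (base.map Prod.fst).Nodup) : (pvKs base t).Nodup := by
  have h1 : ((base.filter (fun q => decide (t ≤ q.2))).map Prod.fst).Nodup :=
    hnd.sublist ((List.filter_sublist).map Prod.fst)
  exact (PySem.List.sorted_perm _ _ _).nodup_iff.mpr h1

theorem mem_pvKs (base : List (String × Int)) (t : Int) (k : String) :
    k ∈ pvKs base t ↔ ∃ p ∈ base, p.1 = k ∧ t ≤ p.2 := by
  unfold pvKs
  rw [PySem.List.mem_sorted, List.mem_map]
  constructor
  · rintro ⟨p, hp, rfl⟩
    rcases List.mem_filter.mp hp with ⟨hpb, hpt⟩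
    exact ⟨p, hpb, rfl, of_decide_eq_true hpt⟩
  · rintro ⟨p, hpb, rfl, hpt⟩
    exact ⟨p, List.mem_filter.mpr ⟨hpb, decide_eq_true hpt⟩, rfl⟩

theorem pvKs_strict (base : List (String × Int)) (t : Int)
    (hnd : (base.map Prod.fst).Nodup) : (pvKs base t).Pairwise (fun a b => b < a) := by
  have hpw : (pvKs base t).Pairwise (fun a b => b ≤ a) :=
    PySem.List.sorted_pairwise_rev _ _
  have hndk := pvKs_nodup base t hnd
  have := hpw.and hndk
  exact this.imp (fun h => lt_of_le_of_ne h.1 h.2.symm)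

theorem mem_pvKs_iff (base : List (String × Int)) (t : Int)
    (hnd : (base.map Prod.fst).Nodup) {p : String × Int} (hp : p ∈ base) :
    p.1 ∈ pvKs base t ↔ t ≤ p.2 := by
  rw [mem_pvKs]
  constructor
  · rintro ⟨q, hqb, hqk, hqt⟩
    have : q = p := List.inj_on_of_nodup_map hnd hqb hp hqk
    exact this ▸ hqt
  · intro h
    exact ⟨p, hp, rfl, h⟩

-- split of base at a level key
theorem pvSplit (base : List (String × Int)) (t : Int)
    (hnd : (base.map Prod.fst).Nodup) {k : String} (hk : k ∈ pvKs base t) :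
    ∃ S l T, base = S ++ (k, l) :: T ∧ t ≤ l ∧ (∀ p ∈ S, p.1 ≠ k) ∧ (∀ p ∈ T, p.1 ≠ k) := by
  rcases (mem_pvKs base t k).mp hk with ⟨p, hpb, hpk, hpt⟩
  subst hpk
  rcases List.append_of_mem hpb with ⟨S, T, hST⟩
  have hndST : ((S.map Prod.fst) ++ p.1 :: (T.map Prod.fst)).Nodup := by
    have h := hnd
    rw [hST] at h
    simpa using h
  rw [List.nodup_append] at hndST
  refine ⟨S, p.2, T, by simpa using hST, hpt, ?_, ?_⟩
  · intro p hpS hpk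
    exact hndST.2.2 _ (List.mem_map_of_mem hpS) _ (List.mem_cons_self) hpk
  · intro p hpT hpk
    have := hndST.2.1
    rw [List.nodup_cons] at this
    exact this.1 (by rw [← hpk]; exact List.mem_map_of_mem hpT)

-- kj := (pvKs base t)[j] is not among the first j demoted keys
theorem pvKj_not_take (base : List (String × Int)) (t : Int)
    (hnd : (base.map Prod.fst).Nodup) (j : Nat) (hj : j < (pvKs base t).length) :
    (pvKs base t)[j] ∉ (pvKs base t).take j := by
  intro hmem
  have hndk := pvKs_nodup base t hnd
  have hsplit : pvKs base t = (pvKs base t).take j ++ (pvKs base t).drop j :=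
    (List.take_append_drop j _).symm
  have h2 : (pvKs base t)[j] ∈ (pvKs base t).drop j := by
    rw [List.drop_eq_getElem_cons hj]
    exact List.mem_cons_self
  rw [hsplit, List.nodup_append] at hndk
  exact hndk.2.2 _ hmem _ h2 rfl

-- the state after finishing a whole level is the fresh state one level down
theorem pvLevelDone (base : List (String × Int)) (t : Int)
    (hnd : (base.map Prod.fst).Nodup) :
    pvState base t (pvKs base t) = pvState base (t - 1) [] := by
  unfold pvState
  refine List.map_congr_left (fun p hp => ?_)
  unfold pvVal
  have hiff := mem_pvKs_iff base t hnd hp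
  by_cases hk : p.1 ∈ pvKs base t
  · have htle := hiff.mp hk
    rw [if_pos hk, if_neg (by simp : ¬ p.1 ∈ ([] : List String))]
    simp only [Prod.mk.injEq, true_and]
    omega
  · have htle : ¬ t ≤ p.2 := fun h => hk (hiff.mpr h)
    rw [if_neg hk, if_neg (by simp : ¬ p.1 ∈ ([] : List String))]
    simp only [Prod.mk.injEq, true_and]
    omega


theorem pvPOf_split (A B : List (String × Int)) (x : String × Int) :
    pvPOf (A ++ x :: B) = pvPOf A * (max 1 x.2 * pvPOf B) := by
  simp [pvPOf]

theorem pvState_split (S T : List (String × Int)) (p : String × Int) (t : Int) (D : List String) :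
    pvState (S ++ p :: T) t D = pvState S t D ++ (p.1, pvVal t D p) :: pvState T t D := by
  simp [pvState]

theorem pvMem_take_succ (ks : List String) (j : Nat) (hj : j < ks.length) (x : String) :
    x ∈ ks.take (j + 1) ↔ x ∈ ks.take j ∨ x = ks[j] := by
  rw [List.take_succ_eq_append_getElem hj, List.mem_append, List.mem_singleton]

theorem pvMem_drop_of_not_take (ks : List String) (j : Nat) (x : String)
    (hx : x ∈ ks) (hnt : x ∉ ks.take j) : x ∈ ks.drop j := by
  rcases List.mem_append.mp ((List.take_append_drop j ks) ▸ hx) with h | h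
  · exact absurd h hnt
  · exact h

theorem pvDrop_le (base : List (String × Int)) (t : Int)
    (hnd : (base.map Prod.fst).Nodup) (j : Nat) (hj : j < (pvKs base t).length)
    (x : String) (hx : x ∈ (pvKs base t).drop j) : x ≤ (pvKs base t)[j] := by
  have hpw := (pvKs_strict base t hnd).sublist (List.drop_sublist j _)
  rw [List.drop_eq_getElem_cons hj] at hx hpw
  rcases List.mem_cons.mp hx with rfl | h
  · exact le_refl _
  · exact le_of_lt ((List.pairwise_cons.mp hpw).1 x h)

-- the single-entry decomposition behind one demotion step at level t
theorem pvRepl (base : List (String × Int)) (t : Int)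
    (hnd : (base.map Prod.fst).Nodup) (k : String) (hk : k ∈ pvKs base t)
    (D D' : List String) (hkD : k ∉ D) (hiff : ∀ x, x ∈ D' ↔ x ∈ D ∨ x = k) :
    ∃ S T,
      pvState base t D = pvState S t D ++ (k, t) :: pvState T t D ∧
      pvState base t D' = pvState S t D ++ (k, t - 1) :: pvState T t D := by
  rcases pvSplit base t hnd hk with ⟨S, l, T, hST, hlt, hS, hT⟩
  have hSmap : pvState S t D' = pvState S t D := by
    unfold pvState
    refine List.map_congr_left (fun p hp => ?_)
    unfold pvVal
    have hiffp : p.1 ∈ D' ↔ p.1 ∈ D := by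
      rw [hiff]
      have := hS p hp
      tauto
    by_cases hmem : p.1 ∈ D
    · rw [if_pos (hiffp.mpr hmem), if_pos hmem]
    · rw [if_neg (fun h => hmem (hiffp.mp h)), if_neg hmem]
  have hTmap : pvState T t D' = pvState T t D := by
    unfold pvState
    refine List.map_congr_left (fun p hp => ?_)
    unfold pvVal
    have hiffp : p.1 ∈ D' ↔ p.1 ∈ D := by
      rw [hiff]
      have := hT p hp
      tauto
    by_cases hmem : p.1 ∈ D
    · rw [if_pos (hiffp.mpr hmem), if_pos hmem]
    · rw [if_neg (fun h => hmem (hiffp.mp h)), if_neg hmem]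
  refine ⟨S, T, ?_, ?_⟩
  · rw [hST, pvState_split]
    have hv : pvVal t D (k, l) = t := by
      unfold pvVal
      rw [if_neg (by simpa using hkD)]
      dsimp only
      omega
    rw [hv]
  · rw [hST, pvState_split, hSmap, hTmap]
    have hv : pvVal t D' (k, l) = t - 1 := by
      unfold pvVal
      rw [if_pos (by simpa using (hiff k).mpr (Or.inr rfl))]
    rw [hv]

theorem pvShape0 (base : List (String × Int)) (t : Int) (ht : 1 ≤ t) :
    pvPOf (pvState base t [])
      = pvRest base t * t ^ (base.filter (fun q => decide (t ≤ q.2))).length := by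
  induction base with
  | nil => simp [pvPOf, pvState, pvRest]
  | cons p b ih =>
    have hval : pvVal t [] p = min p.2 t := by
      unfold pvVal; rw [if_neg (by simp)]
    by_cases hp : t ≤ p.2
    · have h1 : pvPOf (pvState (p :: b) t []) = t * pvPOf (pvState b t []) := by
        simp only [pvState, List.map_cons, pvPOf, List.prod_cons, hval]
        have : max 1 (min p.2 t) = t := by omega
        rw [this]
      have h2 : ((p :: b).filter (fun q => decide (t ≤ q.2))).length
          = (b.filter (fun q => decide (t ≤ q.2))).length + 1 := by
        simp [hp]
      have h3 : pvRest (p :: b) t = pvRest b t := by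
        unfold pvRest
        rw [List.filter_cons, if_neg (by simpa using (by omega : ¬ p.2 < t))]
      rw [h1, h2, h3, ih, pow_succ]
      ring
    · have h1 : pvPOf (pvState (p :: b) t []) = max 1 p.2 * pvPOf (pvState b t []) := by
        simp only [pvState, List.map_cons, pvPOf, List.prod_cons, hval]
        have : min p.2 t = p.2 := by omega
        rw [this]
      have h2 : ((p :: b).filter (fun q => decide (t ≤ q.2))).length
          = (b.filter (fun q => decide (t ≤ q.2))).length := by
        simp [hp]
      have h3 : pvRest (p :: b) t = max 1 p.2 * pvRest b t := by
        unfold pvRest pvPOf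
        rw [List.filter_cons, if_pos (by simpa using (by omega : p.2 < t))]
        simp
      rw [h1, h2, h3, ih]
      ring

-- shape of the product after j demotions at level t
theorem pvShape (base : List (String × Int)) (t : Int) (ht : 2 ≤ t)
    (hnd : (base.map Prod.fst).Nodup) :
    ∀ j, j ≤ (pvKs base t).length →
      pvPOf (pvState base t ((pvKs base t).take j))
        = pvRest base t * (t - 1) ^ j * t ^ ((pvKs base t).length - j) := by
  intro j
  induction j with
  | zero =>
    intro _
    simp only [List.take_zero, pow_zero, mul_one, Nat.sub_zero]
    rw [pvShape0 base t (by omega), pvKs_length]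
  | succ j ih =>
    intro hj1
    have hj : j < (pvKs base t).length := by omega
    have hIH := ih (by omega)
    rcases pvRepl base t hnd (pvKs base t)[j] (List.getElem_mem hj)
        ((pvKs base t).take j) ((pvKs base t).take (j + 1))
        (pvKj_not_take base t hnd j hj) (pvMem_take_succ _ j hj) with ⟨S, T, hSt, hSt1⟩
    have hPj : pvPOf (pvState base t ((pvKs base t).take j))
        = pvPOf (pvState S t ((pvKs base t).take j)) * (t * pvPOf (pvState T t ((pvKs base t).take j))) := by
      rw [hSt, pvPOf_split]
      have : max 1 t = t := by omega
      rw [this]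
    have hPj1 : pvPOf (pvState base t ((pvKs base t).take (j + 1)))
        = pvPOf (pvState S t ((pvKs base t).take j)) * ((t - 1) * pvPOf (pvState T t ((pvKs base t).take j))) := by
      rw [hSt1, pvPOf_split]
      have : max 1 (t - 1) = t - 1 := by omega
      rw [this]
    have hkey : pvPOf (pvState base t ((pvKs base t).take (j + 1))) * t
        = pvPOf (pvState base t ((pvKs base t).take j)) * (t - 1) := by
      rw [hPj, hPj1]; ring
    rw [hIH] at hkey
    have hsub : (pvKs base t).length - j = ((pvKs base t).length - (j + 1)) + 1 := by omega
    rw [hsub, pow_succ] at hkey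
    have ht0 : t ≠ 0 := by omega
    have : pvPOf (pvState base t ((pvKs base t).take (j + 1))) * t
        = (pvRest base t * (t - 1) ^ (j + 1) * t ^ ((pvKs base t).length - (j + 1))) * t := by
      rw [hkey, pow_succ]; ring
    exact mul_right_cancel₀ ht0 this

-- μ decreases by exactly one with each demotion
theorem pvMu_dec (base : List (String × Int)) (t : Int) (ht : 2 ≤ t)
    (hnd : (base.map Prod.fst).Nodup) (j : Nat) (hj : j < (pvKs base t).length) :
    pvMu base t ((pvKs base t).take (j + 1)) + 1 = pvMu base t ((pvKs base t).take j) := by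
  rcases pvRepl base t hnd (pvKs base t)[j] (List.getElem_mem hj)
      ((pvKs base t).take j) ((pvKs base t).take (j + 1))
      (pvKj_not_take base t hnd j hj) (pvMem_take_succ _ j hj) with ⟨S, T, hSt, hSt1⟩
  unfold pvMu
  rw [hSt, hSt1]
  simp only [List.map_append, List.map_cons, List.sum_append, List.sum_cons]
  omega

theorem pvMu_level (base : List (String × Int)) (t : Int)
    (hnd : (base.map Prod.fst).Nodup) :
    pvMu base t (pvKs base t) = pvMu base (t - 1) [] := by
  unfold pvMu
  rw [pvLevelDone base t hnd]

theorem pvLexLE_refl (x : Int × String) : pvLexLE x x := Or.inr ⟨rfl, le_refl _⟩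

theorem pvLexLE_trans {x y z : Int × String} (h1 : pvLexLE x y) (h2 : pvLexLE y z) : pvLexLE x z := by
  rcases h1 with h1 | ⟨e1, l1⟩ <;> rcases h2 with h2 | ⟨e2, l2⟩
  · exact Or.inl (lt_trans h1 h2)
  · exact Or.inl (e2 ▸ h1)
  · exact Or.inl (e1 ▸ h2)
  · exact Or.inr ⟨e1.trans e2, le_trans l1 l2⟩

theorem pvMaxStep_facts (acc : Option (Int × String)) (x : Int × String) :
    ∃ z, pvMaxStep acc x = some z ∧ pvLexLE x z ∧ ∀ y, acc = some y → pvLexLE y z := by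
  cases acc with
  | none => exact ⟨x, rfl, pvLexLE_refl x, by simp⟩
  | some m =>
    by_cases hcond : (decide (m.1 < x.1) || !decide (x.1 < m.1) && decide (m.2 < x.2)) = true
    · refine ⟨x, by simp only [pvMaxStep, if_pos hcond], pvLexLE_refl x, ?_⟩
      intro y hy
      have hmy : m = y := Option.some_inj.mp hy
      rw [← hmy]
      simp only [Bool.or_eq_true, Bool.and_eq_true, Bool.not_eq_eq_eq_not, Bool.not_true,
        decide_eq_true_eq, decide_eq_false_iff_not] at hcond
      rcases hcond with h | ⟨h1, h2⟩
      · exact Or.inl h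
      · rcases lt_trichotomy m.1 x.1 with hlt | heq | hgt
        · exact Or.inl hlt
        · exact Or.inr ⟨heq, le_of_lt h2⟩
        · exact absurd hgt h1
    · refine ⟨m, by simp only [pvMaxStep, if_neg hcond], ?_, ?_⟩
      · simp only [Bool.or_eq_true, Bool.and_eq_true, Bool.not_eq_eq_eq_not, Bool.not_true,
          decide_eq_true_eq, decide_eq_false_iff_not, not_or, not_and] at hcond
        obtain ⟨h1, h2⟩ := hcond
        rcases lt_trichotomy x.1 m.1 with hlt | heq | hgt
        · exact Or.inl hlt
        · refine Or.inr ⟨heq, ?_⟩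
          have := h2 (by omega)
          exact not_lt.mp this
        · exact absurd hgt h1
      · intro y hy
        have hmy : m = y := Option.some_inj.mp hy
        rw [← hmy]
        exact pvLexLE_refl m

theorem pvFold_some : ∀ (xs : List (Int × String)) (y0 : Int × String),
    ∃ m, xs.foldl pvMaxStep (some y0) = some m := by
  intro xs
  induction xs with
  | nil => exact fun y0 => ⟨y0, rfl⟩
  | cons a l ih =>
    intro y0
    rcases pvMaxStep_facts (some y0) a with ⟨z, hz, _, _⟩
    rcases ih z with ⟨m, hm⟩
    exact ⟨m, by rw [List.foldl_cons, hz, hm]⟩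

theorem pvFold_ub : ∀ (xs : List (Int × String)) (acc : Option (Int × String)) (m : Int × String),
    xs.foldl pvMaxStep acc = some m →
      (∀ x ∈ xs, pvLexLE x m) ∧ (∀ y, acc = some y → pvLexLE y m) := by
  intro xs
  induction xs with
  | nil =>
    intro acc m h
    refine ⟨by simp, fun y hy => ?_⟩
    rw [hy] at h
    have hym : y = m := Option.some_inj.mp h
    rw [← hym]
    exact pvLexLE_refl y
  | cons a l ih =>
    intro acc m h
    rw [List.foldl_cons] at h
    obtain ⟨hxs, hacc'⟩ := ih _ _ h
    rcases pvMaxStep_facts acc a with ⟨z, hz, haz, hyz⟩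
    have hzm : pvLexLE z m := hacc' z hz
    refine ⟨fun x hx => ?_, fun y hy => pvLexLE_trans (hyz y hy) hzm⟩
    rcases List.mem_cons.mp hx with rfl | hx'
    · exact pvLexLE_trans haz hzm
    · exact hxs x hx'

theorem pvFoldMax_eq (xs : List (Int × String)) (y : Int × String)
    (hy : y ∈ xs) (hub : ∀ x ∈ xs, pvLexLE x y) : xs.foldl pvMaxStep none = some y := by
  cases xs with
  | nil => cases hy
  | cons a l =>
    have h1 : (a :: l).foldl pvMaxStep none = l.foldl pvMaxStep (some a) := rfl
    rcases pvFold_some l a with ⟨m, hm⟩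
    rw [h1, hm]
    have hin : m ∈ a :: l := by
      rcases pvMaxStep_mem l (some a) m hm with h | h
      · exact List.mem_cons_of_mem _ h
      · exact (Option.some_inj.mp h) ▸ List.mem_cons_self
    obtain ⟨hl, hacc⟩ := pvFold_ub l (some a) m hm
    have h2 : pvLexLE m y := hub m hin
    have h3 : pvLexLE y m := by
      rcases List.mem_cons.mp hy with rfl | hy'
      · exact hacc y rfl
      · exact hl y hy'
    have heq : m = y := by
      have e1 : m.1 = y.1 := by
        rcases h2 with h | ⟨e, _⟩ <;> rcases h3 with h' | ⟨e', _⟩ <;> omega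
      have e2 : m.2 = y.2 := by
        rcases h2 with h | ⟨_, hle⟩
        · omega
        · rcases h3 with h' | ⟨_, hle'⟩
          · omega
          · exact le_antisymm hle hle'
      exact Prod.ext e1 e2
    rw [heq]

-- pvBest on a level state selects the current level and the largest undemoted key
theorem pvBest_char (base : List (String × Int)) (t : Int) (ht : 2 ≤ t)
    (hnd : (base.map Prod.fst).Nodup) (j : Nat) (hj : j < (pvKs base t).length)
    (Ld : PySem.Dict String Int) (hLd : Ld.items = pvState base t ((pvKs base t).take j)) :
    pvBest Ld = some (t, (pvKs base t)[j]) := by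
  rw [pvBest_def, pvScan_foldl]
  have hkj : (pvKs base t)[j] ∈ pvKs base t := List.getElem_mem hj
  rcases (mem_pvKs base t _).mp hkj with ⟨p0, hp0b, hp0k, hp0t⟩
  have hnotake := pvKj_not_take base t hnd j hj
  have hval0 : pvVal t ((pvKs base t).take j) p0 = t := by
    unfold pvVal
    rw [if_neg (by rw [hp0k]; exact hnotake)]
    omega
  have hmem : ((t : Int), (pvKs base t)[j]) ∈
      ((Ld.items.filter (fun q => decide ((1 : Int) < q.2))).map (fun q => (q.2, q.1))) := by
    rw [hLd]
    have hst : ((pvKs base t)[j], (t : Int)) ∈ pvState base t ((pvKs base t).take j) := by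
      unfold pvState
      have : ((pvKs base t)[j], (t : Int)) = (p0.1, pvVal t ((pvKs base t).take j) p0) := by
        rw [hval0, hp0k]
      rw [this]
      exact List.mem_map_of_mem hp0b
    have hfil : ((pvKs base t)[j], (t : Int)) ∈
        (pvState base t ((pvKs base t).take j)).filter (fun q => decide ((1 : Int) < q.2)) :=
      List.mem_filter.mpr ⟨hst, by simp; omega⟩
    exact List.mem_map_of_mem hfil
  have hub : ∀ x ∈ ((Ld.items.filter (fun q => decide ((1 : Int) < q.2))).map (fun q => (q.2, q.1))),
      pvLexLE x ((t : Int), (pvKs base t)[j]) := by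
    intro x hx
    rcases List.mem_map.mp hx with ⟨q, hqf, rfl⟩
    rcases List.mem_filter.mp hqf with ⟨hqs, _⟩
    rw [hLd] at hqs
    rcases List.mem_map.mp hqs with ⟨p, hpb, rfl⟩
    dsimp only
    unfold pvVal
    by_cases hmemj : p.1 ∈ (pvKs base t).take j
    · rw [if_pos hmemj]
      exact Or.inl (by omega)
    · rw [if_neg hmemj]
      rcases lt_or_eq_of_le (min_le_right p.2 t) with hlt | heq
      · exact Or.inl hlt
      · have hpt : t ≤ p.2 := by omega
        have hks : p.1 ∈ pvKs base t := (mem_pvKs_iff base t hnd hpb).mpr hpt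
        have hdrop : p.1 ∈ (pvKs base t).drop j := pvMem_drop_of_not_take _ j _ hks hmemj
        exact Or.inr ⟨heq, pvDrop_le base t hnd j hj p.1 hdrop⟩
  exact pvFoldMax_eq _ _ hmem hub

-- the greedy insert step moves the state from take j to take (j+1)
theorem pvInsert_step (base : List (String × Int)) (t : Int)
    (_hnd : (base.map Prod.fst).Nodup) (j : Nat) (hj : j < (pvKs base t).length)
    (Ld : PySem.Dict String Int) (hLd : Ld.items = pvState base t ((pvKs base t).take j)) :
    (Ld.insert (pvKs base t)[j] (t - 1)).items = pvState base t ((pvKs base t).take (j + 1)) := by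
  have hkj : (pvKs base t)[j] ∈ pvKs base t := List.getElem_mem hj
  rcases (mem_pvKs base t _).mp hkj with ⟨q, hqb, hqk, hqt⟩
  have hcont : Ld.contains (pvKs base t)[j] = true := by
    rw [PySem.Dict.contains_iff_mem_keys, pvKeys_eq, hLd]
    unfold pvState
    rw [List.map_map]
    rw [← hqk]
    exact List.mem_map_of_mem (f := Prod.fst ∘ _) hqb
  rw [PySem.Dict.items_insert_of_contains Ld _ hcont, hLd]
  unfold pvState
  rw [List.map_map]
  refine List.map_congr_left (fun p hp => ?_)
  simp only [Function.comp_apply]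
  by_cases hpk : p.1 = (pvKs base t)[j]
  · rw [if_pos (by simpa using hpk)]
    unfold pvVal
    rw [if_pos (by rw [pvMem_take_succ _ j hj]; exact Or.inr hpk), hpk]
  · rw [if_neg (by simpa using hpk)]
    unfold pvVal
    have hmemiff : p.1 ∈ (pvKs base t).take (j + 1) ↔ p.1 ∈ (pvKs base t).take j := by
      rw [pvMem_take_succ _ j hj]
      tauto
    by_cases hmem : p.1 ∈ (pvKs base t).take j
    · rw [if_pos hmem, if_pos (hmemiff.mpr hmem)]
    · rw [if_neg hmem, if_neg (fun h => hmem (hmemiff.mp h))]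

-- exactness of the incremental product update
theorem pvProd_step (base : List (String × Int)) (t : Int) (ht : 2 ≤ t)
    (hnd : (base.map Prod.fst).Nodup) (j : Nat) (hj : j < (pvKs base t).length) :
    PySem.Int.floordiv (pvPOf (pvState base t ((pvKs base t).take j))) t * (t - 1)
      = pvPOf (pvState base t ((pvKs base t).take (j + 1))) := by
  have hc : (pvKs base t).length - j = ((pvKs base t).length - (j + 1)) + 1 := by omega
  rw [pvShape base t ht hnd j (by omega), pvShape base t ht hnd (j + 1) (by omega), hc, pow_succ]
  have hpos : (0 : Int) < t := by omega
  rw [PySem.Int.floordiv_eq_ediv_of_pos hpos]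
  have harr : pvRest base t * (t - 1) ^ j * (t ^ ((pvKs base t).length - (j + 1)) * t)
      = (pvRest base t * (t - 1) ^ j * t ^ ((pvKs base t).length - (j + 1))) * t := by ring
  rw [harr, Int.mul_ediv_cancel _ (by omega)]
  ring

-- the full-level jump of B equals the product after the whole level
theorem pvFull_eq (base : List (String × Int)) (t : Int) (ht : 2 ≤ t)
    (hnd : (base.map Prod.fst).Nodup) :
    PySem.Int.floordiv (pvPOf (pvState base t [])) (t ^ (pvKs base t).length)
        * (t - 1) ^ (pvKs base t).length
      = pvPOf (pvState base t (pvKs base t)) := by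
  have h0 := pvShape base t ht hnd 0 (by omega)
  have hc := pvShape base t ht hnd (pvKs base t).length (le_refl _)
  simp only [List.take_zero, pow_zero, mul_one, Nat.sub_zero] at h0
  simp only [Nat.sub_self, pow_zero, mul_one] at hc
  have hstate0 : pvState base t ((pvKs base t).take 0) = pvState base t [] := by
    rw [List.take_zero]
  have hstatec : pvState base t ((pvKs base t).take (pvKs base t).length) = pvState base t (pvKs base t) := by
    rw [List.take_length]
  rw [h0, ← hstatec, hc]
  have hpos : (0 : Int) < t ^ (pvKs base t).length := by positivity
  rw [PySem.Int.floordiv_eq_ediv_of_pos hpos]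
  rw [Int.mul_ediv_cancel _ (ne_of_gt hpos)]

-- the product is monotone along the level
theorem pvP_mono (base : List (String × Int)) (t : Int) (ht : 2 ≤ t)
    (hnd : (base.map Prod.fst).Nodup) (j : Nat) (hj : j ≤ (pvKs base t).length) :
    pvPOf (pvState base t (pvKs base t)) ≤ pvPOf (pvState base t ((pvKs base t).take j)) := by
  rw [pvShape base t ht hnd j hj]
  have hc := pvShape base t ht hnd (pvKs base t).length (le_refl _)
  simp only [Nat.sub_self, pow_zero, mul_one] at hc
  have hstatec : pvState base t ((pvKs base t).take (pvKs base t).length) = pvState base t (pvKs base t) := by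
    rw [List.take_length]
  rw [← hstatec, hc]
  have hsplit : (pvKs base t).length = j + ((pvKs base t).length - j) := by omega
  have hR : 1 ≤ pvRest base t := pvPOf_one_le _
  calc pvRest base t * (t - 1) ^ (pvKs base t).length
      = pvRest base t * (t - 1) ^ j * (t - 1) ^ ((pvKs base t).length - j) := by
        rw [mul_assoc, ← pow_add, ← hsplit]
    _ ≤ pvRest base t * (t - 1) ^ j * t ^ ((pvKs base t).length - j) := by
        have hple : (t - 1) ^ ((pvKs base t).length - j) ≤ t ^ ((pvKs base t).length - j) :=
          pow_le_pow_left₀ (by omega) (by omega) _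
        have hR1 : 1 ≤ pvRest base t := pvPOf_one_le _
        have hp1 : (0 : Int) ≤ (t - 1) ^ j := pow_nonneg (by omega) j
        have hnn : 0 ≤ pvRest base t * (t - 1) ^ j := by nlinarith
        exact mul_le_mul_of_nonneg_left hple hnn

-- values of a low state never exceed 1, so there is no candidate
theorem pvBest_none (t : Int) (ht : t ≤ 1) (base : List (String × Int))
    (Ld : PySem.Dict String Int) (hLd : Ld.items = pvState base t []) :
    pvBest Ld = none := by
  rw [pvBest_def, pvScan_foldl]
  have hfil : (Ld.items.filter (fun q => decide ((1 : Int) < q.2))) = [] := by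
    rw [List.filter_eq_nil_iff]
    intro q hq
    rw [hLd] at hq
    rcases List.mem_map.mp hq with ⟨p, hpb, rfl⟩
    simp only [decide_eq_true_eq, not_lt]
    unfold pvVal
    rw [if_neg (by simp)]
    omega
  rw [hfil]
  rfl

theorem pvGreedy_stop (cap P : Int) (Ld : PySem.Dict String Int)
    (h : ¬ P > cap ∨ pvBest Ld = none) : ∀ fuel, pvGreedy cap fuel Ld P = Ld := by
  intro fuel
  cases fuel with
  | zero => rw [pvGreedy]
  | succ f =>
    rcases h with h | h
    · rw [pvGreedy, if_neg h]
    · by_cases hc : P > cap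
      · rw [pvGreedy, if_pos hc, h]
      · rw [pvGreedy, if_neg hc]

theorem pvDescend_eq (cap : Int) (lens : List Int) (f : Nat) (L P : Int) :
    pvDescend cap lens (f + 1) L P =
      if 2 ≤ L ∧ cap < P then
        if cap < PySem.Int.floordiv P (L ^ lens.countP (fun l => decide (L ≤ l)))
            * (L - 1) ^ lens.countP (fun l => decide (L ≤ l))
        then pvDescend cap lens f (L - 1)
            (PySem.Int.floordiv P (L ^ lens.countP (fun l => decide (L ≤ l)))
              * (L - 1) ^ lens.countP (fun l => decide (L ≤ l)))
        else (L, P)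
      else (L, P) := rfl

-- partial level: greedy and the r-loop of B agree step for step
theorem pvInner (cap t : Int) (base : List (String × Int))
    (hnd : (base.map Prod.fst).Nodup) (ht : 2 ≤ t)
    (hfull : pvPOf (pvState base t (pvKs base t)) ≤ cap) :
    ∀ (n j : Nat), (pvKs base t).length - j = n → j ≤ (pvKs base t).length →
    ∀ (Ld : PySem.Dict String Int), Ld.items = pvState base t ((pvKs base t).take j) →
    ∀ (fuel : Nat), pvMu base t ((pvKs base t).take j) < fuel →
    ∀ (fuelP : Nat), n < fuelP → ∀ (racc : Int),
      ∃ r : Nat, j ≤ r ∧ r ≤ (pvKs base t).length ∧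
        (pvGreedy cap fuel Ld (pvPOf (pvState base t ((pvKs base t).take j)))).items
          = pvState base t ((pvKs base t).take r) ∧
        pvPartial cap t fuelP (pvPOf (pvState base t ((pvKs base t).take j))) racc
          = (pvPOf (pvState base t ((pvKs base t).take r)), racc + ((r - j : Nat) : Int)) := by
  intro n
  induction n with
  | zero =>
    intro j hn hj Ld hLd fuel hfuel fuelP hfp racc
    have hjc : (pvKs base t).take j = pvKs base t := by
      have : j = (pvKs base t).length := by omega
      rw [this, List.take_length]
    have hple : ¬ pvPOf (pvState base t ((pvKs base t).take j)) > cap := by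
      rw [hjc]; exact not_lt.mpr hfull
    refine ⟨j, le_refl _, hj, ?_, ?_⟩
    · rw [pvGreedy_stop cap _ Ld (Or.inl hple) fuel, hLd]
    · obtain ⟨g, rfl⟩ : ∃ g, fuelP = g + 1 := ⟨fuelP - 1, by omega⟩
      rw [pvPartial, if_neg hple]
      simp
  | succ n ih =>
    intro j hn hj Ld hLd fuel hfuel fuelP hfp racc
    have hj' : j < (pvKs base t).length := by omega
    by_cases hcap : pvPOf (pvState base t ((pvKs base t).take j)) > cap
    · obtain ⟨f, rfl⟩ : ∃ f, fuel = f + 1 := ⟨fuel - 1, by omega⟩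
      obtain ⟨g, rfl⟩ : ∃ g, fuelP = g + 1 := ⟨fuelP - 1, by omega⟩
      have hins := pvInsert_step base t hnd j hj' Ld hLd
      have hprod := pvProd_step base t ht hnd j hj'
      have hmu := pvMu_dec base t ht hnd j hj'
      rcases ih (j + 1) (by omega) (by omega) _ hins f (by omega) g (by omega) (racc + 1)
        with ⟨r, hr1, hr2, hg, hp⟩
      refine ⟨r, by omega, hr2, ?_, ?_⟩
      · rw [pvGreedy, if_pos hcap, pvBest_char base t ht hnd j hj' Ld hLd]
        dsimp only
        rw [hprod]
        exact hg
      · rw [pvPartial, if_pos hcap, hprod, hp]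
        have : racc + 1 + ((r - (j + 1) : Nat) : Int) = racc + ((r - j : Nat) : Int) := by omega
        rw [this]
    · refine ⟨j, le_refl _, hj, ?_, ?_⟩
      · rw [pvGreedy_stop cap _ Ld (Or.inl hcap) fuel, hLd]
      · obtain ⟨g, rfl⟩ : ∃ g, fuelP = g + 1 := ⟨fuelP - 1, by omega⟩
        rw [pvPartial, if_neg hcap]
        simp

-- full level: greedy walks through the whole level
theorem pvWalk (cap t : Int) (base : List (String × Int))
    (hnd : (base.map Prod.fst).Nodup) (ht : 2 ≤ t)
    (hfull : cap < pvPOf (pvState base t (pvKs base t))) :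
    ∀ (n j : Nat), (pvKs base t).length - j = n → j ≤ (pvKs base t).length →
    ∀ (Ld : PySem.Dict String Int), Ld.items = pvState base t ((pvKs base t).take j) →
    ∀ (fuel : Nat), pvMu base t ((pvKs base t).take j) < fuel →
      ∃ (Ld' : PySem.Dict String Int) (fuel' : Nat),
        Ld'.items = pvState base t (pvKs base t) ∧ pvMu base t (pvKs base t) < fuel' ∧
        pvGreedy cap fuel Ld (pvPOf (pvState base t ((pvKs base t).take j)))
          = pvGreedy cap fuel' Ld' (pvPOf (pvState base t (pvKs base t))) := by
  intro n
  induction n with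
  | zero =>
    intro j hn hj Ld hLd fuel hfuel
    have hjc : (pvKs base t).take j = pvKs base t := by
      have : j = (pvKs base t).length := by omega
      rw [this, List.take_length]
    rw [hjc] at hLd hfuel ⊢
    exact ⟨Ld, fuel, hLd, hfuel, rfl⟩
  | succ n ih =>
    intro j hn hj Ld hLd fuel hfuel
    have hj' : j < (pvKs base t).length := by omega
    have hcap : pvPOf (pvState base t ((pvKs base t).take j)) > cap :=
      lt_of_lt_of_le hfull (pvP_mono base t ht hnd j (le_of_lt hj'))
    obtain ⟨f, rfl⟩ : ∃ f, fuel = f + 1 := ⟨fuel - 1, by omega⟩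
    have hins := pvInsert_step base t hnd j hj' Ld hLd
    have hmu := pvMu_dec base t ht hnd j hj'
    rw [pvGreedy, if_pos hcap, pvBest_char base t ht hnd j hj' Ld hLd]
    dsimp only
    rw [pvProd_step base t ht hnd j hj']
    exact ih (j + 1) (by omega) (by omega) _ hins f (by omega)

-- THE LEVEL-DESCENT CORRESPONDENCE
theorem pvOuter (cap : Int) (base : List (String × Int))
    (hnd : (base.map Prod.fst).Nodup) (_hnn : ∀ p ∈ base, 0 ≤ p.2) :
    ∀ (tn : Nat) (t : Int), t.toNat = tn → 0 ≤ t →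
    ∀ (Ld : PySem.Dict String Int), Ld.items = pvState base t [] →
    ∀ (fuel : Nat), pvMu base t [] < fuel →
      (pvGreedy cap fuel Ld (pvPOf (pvState base t []))).items
        = pvState base
            (pvDescend cap (base.map Prod.snd) (tn + 1) t (pvPOf (pvState base t []))).1
            (pvDemoted cap base
              (pvDescend cap (base.map Prod.snd) (tn + 1) t (pvPOf (pvState base t [])))) := by
  intro tn
  induction tn using Nat.strong_induction_on with
  | _ tn ihs =>
    intro t htn ht0 Ld hLd fuel hfuel
    rw [pvDescend_eq]
    by_cases h2 : 2 ≤ t ∧ cap < pvPOf (pvState base t [])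
    · obtain ⟨ht2, hcapP⟩ := h2
      rw [if_pos ⟨ht2, hcapP⟩]
      rw [pvCount_eq base t, pvFull_eq base t ht2 hnd]
      by_cases hfl : cap < pvPOf (pvState base t (pvKs base t))
      · -- full level still above cap: walk the level, recurse one level down
        rw [if_pos hfl]
        have hLd0 : Ld.items = pvState base t ((pvKs base t).take 0) := by
          rw [List.take_zero]; exact hLd
        have hfuel0 : pvMu base t ((pvKs base t).take 0) < fuel := by
          rw [List.take_zero]; exact hfuel
        obtain ⟨Ld', fuel', hLd', hmu', heq⟩ := pvWalk cap t base hnd ht2 hfl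
          ((pvKs base t).length) 0 (by omega) (by omega) Ld hLd0 fuel hfuel0
        have hP00 : pvPOf (pvState base t []) = pvPOf (pvState base t ((pvKs base t).take 0)) := by
          rw [List.take_zero]
        rw [hP00, heq]
        have hlev := pvLevelDone base t hnd
        have hLd'' : Ld'.items = pvState base (t - 1) [] := by rw [hLd', hlev]
        have hmu'' : pvMu base (t - 1) [] < fuel' := by
          rw [← pvMu_level base t hnd]; exact hmu'
        have hres := ihs (tn - 1) (by omega) (t - 1) (by omega) (by omega) Ld' hLd'' fuel' hmu''
        rw [hlev]
        have htn1 : tn - 1 + 1 = tn := by omega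
        rw [htn1] at hres
        exact hres
      · -- partial level: B keeps (t, P) and counts the r demotions
        rw [if_neg hfl]
        have hLd0 : Ld.items = pvState base t ((pvKs base t).take 0) := by
          rw [List.take_zero]; exact hLd
        have hfuel0 : pvMu base t ((pvKs base t).take 0) < fuel := by
          rw [List.take_zero]; exact hfuel
        -- fuel bound for the r-loop: c < P.toNat + 1 since P = Rest * t^c >= 2^c > c
        have hshape0 := pvShape0 base t (by omega)
        have hR1 : 1 ≤ pvRest base t := pvPOf_one_le _
        have h2c : (2 : Int) ^ (pvKs base t).length ≤ pvPOf (pvState base t []) := by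
          rw [hshape0, ← pvKs_length]
          calc (2 : Int) ^ (pvKs base t).length
              ≤ t ^ (pvKs base t).length := pow_le_pow_left₀ (by norm_num) (by omega) _
            _ ≤ pvRest base t * t ^ (pvKs base t).length := by
                nlinarith [pow_nonneg (by omega : (0:Int) ≤ t) (pvKs base t).length]
        have hcc : ((pvKs base t).length : Int) < pvPOf (pvState base t []) :=
          lt_of_lt_of_le (by exact_mod_cast Nat.lt_two_pow_self) h2c
        have hfp : (pvKs base t).length - 0 < (pvPOf (pvState base t [])).toNat + 1 := by omega
        rcases pvInner cap t base hnd ht2 (not_lt.mp hfl) ((pvKs base t).length - 0) 0 rfl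
          (by omega) Ld hLd0 fuel hfuel0 ((pvPOf (pvState base t [])).toNat + 1) hfp 0
          with ⟨r, _, hr2, hg, hp⟩
        unfold pvDemoted
        rw [if_pos (show 2 ≤ (t, pvPOf (pvState base t [])).1 ∧
            cap < (t, pvPOf (pvState base t [])).2 from ⟨ht2, hcapP⟩)]
        dsimp only
        have hP00 : pvPOf (pvState base t []) = pvPOf (pvState base t ((pvKs base t).take 0)) := by
          rw [List.take_zero]
        rw [hP00] at hp
        rw [hP00, hp]
        have hr0 : ((0 : Int) + ((r - 0 : Nat) : Int)).toNat = r := by omega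
        rw [hr0]
        exact hg
    · rw [if_neg h2]
      unfold pvDemoted
      rw [if_neg (show ¬ (2 ≤ (t, pvPOf (pvState base t [])).1 ∧
          cap < (t, pvPOf (pvState base t [])).2) by simpa using h2)]
      rcases not_and_or.mp h2 with hlt2 | hnc
      · by_cases hcap : pvPOf (pvState base t []) > cap
        · rw [pvGreedy_stop cap _ Ld
            (Or.inr (pvBest_none t (by omega) base Ld hLd)) fuel, hLd]
        · rw [pvGreedy_stop cap _ Ld (Or.inl hcap) fuel, hLd]
      · rw [pvGreedy_stop cap _ Ld (Or.inl (by simpa using hnc)) fuel, hLd]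

-- the level-descent expression of B equals the greedy expression of A
theorem pvAlt_eq (option_lists : List (String × List Int)) (cap : Int) :
    (let d := option_lists.foldl (fun d p => d.insert p.1 p.2) PySem.Dict.empty
     let lengths := d.items.foldl (fun L p => L.insert p.1 ((p.2.length : Int))) PySem.Dict.empty
     let product := lengths.values.foldl (fun n l => n * max 1 l) 1
     let finalLens := pvGreedy cap ((d.values.map List.length).sum + 1) lengths product
     d.items.map (fun p => (p.1, PySem.List.slice p.2 none (some (finalLens.getD p.1 0)))))
      = enforce_cap_by_shrinking_alt option_lists cap := by
  unfold enforce_cap_by_shrinking_alt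
  dsimp only
  set d0 := option_lists.foldl (fun d p => d.insert p.1 p.2) PySem.Dict.empty with hd0
  have hnd0k : d0.keys.Nodup :=
    PySem.Dict.nodup_keys_foldl_insert_key option_lists Prod.fst (fun _ p => p.2)
      PySem.Dict.empty PySem.Dict.nodup_keys_empty
  have hnd0 : (d0.items.map Prod.fst).Nodup := by rw [← pvKeys_eq]; exact hnd0k
  set L0 := d0.items.foldl (fun L p => L.insert p.1 ((p.2.length : Int))) PySem.Dict.empty with hL0def
  set base := d0.items.map pvLenPair with hbase
  have hL0 : L0.items = base := by
    rw [hL0def, hbase]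
    have hfresh := PySem.Dict.items_foldl_insert_fresh d0.items (fun p => p.1)
      (fun p => ((p.2.length : Int))) (PySem.Dict.empty)
      (fun a _ => PySem.Dict.contains_empty (ν := Int) a.1) hnd0
    simpa using hfresh
  have hbk : base.map Prod.fst = d0.items.map Prod.fst := by
    rw [hbase, List.map_map]; rfl
  have hnd : (base.map Prod.fst).Nodup := by rw [hbk]; exact hnd0
  have hnn : ∀ p ∈ base, 0 ≤ p.2 := by
    intro p hp
    rcases List.mem_map.mp (hbase ▸ hp) with ⟨q, _, rfl⟩
    unfold pvLenPair
    positivity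
  have hlens : L0.values = base.map Prod.snd := by
    rw [pvValues_eq, hL0]
  have hprod : L0.values.foldl (fun n l => n * max 1 l) 1 = pvPOf base := by
    simp only [hlens, pvPOf, List.prod_eq_foldl, List.foldl_map]
  set t0 := (match PySem.List.max? L0.values (fun l => l) with | some m => m | none => 0 : Int) with ht0def
  have hfacts : (∀ p ∈ base, p.2 ≤ t0) ∧ 0 ≤ t0 := by
    rcases hmax : PySem.List.max? L0.values (fun l => l) with _ | m
    · have hvals : L0.values = [] := (PySem.List.max?_eq_none_iff _ _).mp hmax
      rw [hlens] at hvals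
      have hbnil : base = [] := List.map_eq_nil_iff.mp hvals
      constructor
      · intro p hp; rw [hbnil] at hp; cases hp
      · rw [ht0def, hmax]
    · have hisMax := PySem.List.max?_isMax hmax
      have hmem := PySem.List.max?_mem hmax
      have ht0m : t0 = m := by rw [ht0def, hmax]
      constructor
      · intro p hp
        rw [ht0m]
        exact hisMax p.2 (by rw [hlens]; exact List.mem_map_of_mem hp)
      · rw [ht0m]
        rw [hlens] at hmem
        rcases List.mem_map.mp hmem with ⟨q, hq, rfl⟩
        exact hnn q hq
  obtain ⟨hble, ht0nn⟩ := hfacts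
  have hstate : pvState base t0 [] = base := by
    unfold pvState
    refine (List.map_congr_left (fun p hp => ?_)).trans (List.map_id _)
    have hv : pvVal t0 [] p = p.2 := by
      unfold pvVal
      rw [if_neg (by simp)]
      have := hble p hp
      omega
    rw [hv]
    exact rfl
  have hLd0 : L0.items = pvState base t0 [] := by rw [hL0, hstate]
  have hfuel : pvMu base t0 [] < (d0.values.map List.length).sum + 1 := by
    unfold pvMu
    rw [hstate]
    have : base.map (fun p => p.2.toNat) = d0.values.map List.length := by
      rw [hbase, List.map_map, pvValues_eq, List.map_map]
      refine List.map_congr_left (fun q hq => ?_)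
      simp [pvLenPair]
    rw [this]
    omega
  have houter := pvOuter cap base hnd hnn t0.toNat t0 rfl ht0nn L0 hLd0
    ((d0.values.map List.length).sum + 1) hfuel
  rw [hstate] at houter
  rw [hprod]
  set res := pvDescend cap (base.map Prod.snd) (t0.toNat + 1) t0 (pvPOf base) with hres
  rw [hlens]
  -- identify B's demoted list with pvDemoted
  have hdem : (if 2 ≤ res.1 ∧ cap < res.2 then
      (PySem.List.sorted ((L0.items.filter (fun q => decide (res.1 ≤ q.2))).map Prod.fst)
        (fun k => k) true).take ((pvPartial cap res.1 (res.2.toNat + 1) res.2 0).2.toNat)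
    else []) = pvDemoted cap base res := by
    rw [hL0]
    unfold pvDemoted pvKs
    rfl
  rw [hdem]
  refine List.map_congr_left (fun p hp => ?_)
  have hGitems := houter
  set Gf := pvGreedy cap ((d0.values.map List.length).sum + 1) L0 (pvPOf base) with hGf
  have hGnd : Gf.keys.Nodup := by
    rw [pvKeys_eq, hGitems]
    have : (pvState base res.1 (pvDemoted cap base res)).map Prod.fst = base.map Prod.fst := by
      unfold pvState
      rw [List.map_map]
      exact List.map_congr_left (fun q _ => rfl)
    rw [this]
    exact hnd
  have hmemG : (p.1, pvVal res.1 (pvDemoted cap base res) (pvLenPair p)) ∈ Gf.items := by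
    rw [hGitems]
    unfold pvState
    have : (p.1, pvVal res.1 (pvDemoted cap base res) (pvLenPair p))
        = ((pvLenPair p).1, pvVal res.1 (pvDemoted cap base res) (pvLenPair p)) := rfl
    rw [this]
    exact List.mem_map_of_mem (by rw [hbase]; exact List.mem_map_of_mem hp)
  have hgetD : Gf.getD p.1 0 = pvVal res.1 (pvDemoted cap base res) (pvLenPair p) :=
    PySem.Dict.getD_of_mem_items Gf hmemG hGnd 0
  rw [hgetD]
  congr 1
  congr 1
  congr 1
  unfold pvVal pvLenPair
  by_cases hmemD : p.1 ∈ pvDemoted cap base res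
  · rw [if_pos hmemD, if_pos (by rwa [List.contains_iff_mem])]
  · rw [if_neg hmemD, if_neg (by rwa [List.contains_iff_mem])]

-- ===== VERDICT (by name: the statement is the Claim_ definition above) =====
theorem enforce_cap_by_shrinking_spec : Claim_equal_enforce_cap_by_shrinking := by
  intro option_lists cap _hdom _hpre
  unfold Spec_enforce_cap_by_shrinking
  rw [pvA_eq_greedy, pvAlt_eq]
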